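-- pv_equiv track=rewrite | github.com/Elbria/Ex-SemDiv | explainers/contrastive_phrasal/utils.py | index_to_div_labels
-- ===== SOURCE A (Python) =====
-- def index_to_div_labels(ind, len_):
--     """Extracts divergent labels from phrasal indices"""
--     if not ind:
--         return ' '.join(['0']*len_)
--     labels = []
--     for i in range(len_):
--         if i >= ind[0] and i < ind[1]:
--             labels.append('1')
--         else:
--             labels.append('0')
--     return ' '.join(labels)
-- ===== SOURCE B (Python) =====
-- def index_to_div_labels(ind, len_):
--     """Extracts divergent labels from phrasal indices"""
--     if ind:
--         start = max(0, min(ind[0], len_))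
--         ones = max(0, min(ind[1], len_) - start)
--     else:
--         start = ones = 0
--     if len_ <= 0:
--         return ''
--     s = '0 ' * start + '1 ' * ones + '0 ' * (len_ - start - ones)
--     return s[:-1]
-- ===== Notes on version B (the rewrite author's own statement) =====
-- stated objective: faster
-- what changed: Replaces the per-position loop that appends '0'/'1' tokens and joins them with spaces by computing the clamped run boundaries once and emitting the output as repeated '0 '/'1 ' string blocks with the trailing space sliced off.
-- outside the precondition, e.g. on index_to_div_labels([5], 0): A returns '', B raises IndexError
import Mathlib
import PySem

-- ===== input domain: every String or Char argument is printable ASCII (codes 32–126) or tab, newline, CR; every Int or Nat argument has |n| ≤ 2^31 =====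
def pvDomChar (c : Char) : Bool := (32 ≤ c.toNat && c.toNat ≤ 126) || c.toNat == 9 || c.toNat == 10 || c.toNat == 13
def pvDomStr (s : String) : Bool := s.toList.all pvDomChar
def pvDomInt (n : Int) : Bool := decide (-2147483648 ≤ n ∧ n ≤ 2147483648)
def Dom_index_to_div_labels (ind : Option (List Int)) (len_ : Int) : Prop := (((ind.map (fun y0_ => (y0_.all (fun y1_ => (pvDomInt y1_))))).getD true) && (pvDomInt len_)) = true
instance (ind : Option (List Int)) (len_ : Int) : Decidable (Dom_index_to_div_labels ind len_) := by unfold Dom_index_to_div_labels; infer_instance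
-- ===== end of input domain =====

-- B computes the clamped 1-run boundaries once and emits repeated '0 '/'1 ' character blocks
-- with the trailing space sliced off, instead of testing every position in a loop and joining
-- a token list (block emission by string repetition; measurably faster in Python by a constant factor).


-- ===== PORT A =====
def index_to_div_labels (ind : Option (List Int)) (len_ : Int) : String :=
  match ind with
  | none => PySem.Str.join " " (PySem.List.pyRepeat ["0"] len_)
  | some l =>
    if l = [] then PySem.Str.join " " (PySem.List.pyRepeat ["0"] len_)
    else
      -- pyGetD is used with default 0; Pre_ guarantees both indices are in range
      let labels := (PySem.List.pyRange 0 len_ 1).foldl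
        (fun acc i =>
          if PySem.List.pyGetD l 0 0 ≤ i ∧ i < PySem.List.pyGetD l 1 0
          then acc ++ ["1"] else acc ++ ["0"]) []
      PySem.Str.join " " labels

-- ===== PORT B =====
def index_to_div_labels_alt (ind : Option (List Int)) (len_ : Int) : String :=
  let p : Int × Int :=
    match ind with
    | some l =>
      if l = [] then (0, 0)
      else
        let start := max 0 (min (PySem.List.pyGetD l 0 0) len_)
        (start, max 0 (min (PySem.List.pyGetD l 1 0) len_ - start))
    | none => (0, 0)
  if len_ ≤ 0 then ""
  else
    -- '0 ' * start + '1 ' * ones + '0 ' * rest, then s[:-1]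
    let s := PySem.List.pyRepeat ['0', ' '] p.1 ++ PySem.List.pyRepeat ['1', ' '] p.2
      ++ PySem.List.pyRepeat ['0', ' '] (len_ - p.1 - p.2)
    String.ofList (PySem.List.slice s none (some (-1)))

-- ===== PRECONDITION & SPEC =====
-- Pre_ excludes one-element index lists: on them A raises IndexError whenever len_ > 0,
-- and for len_ ≤ 0 it returns '' only because the loop body that would raise never runs,
-- while B reads both span endpoints up front and raises there.
def Pre_index_to_div_labels (ind : Option (List Int)) (len_ : Int) : Prop :=
  (ind.getD []).length ≠ 1
instance (ind : Option (List Int)) (len_ : Int) : Decidable (Pre_index_to_div_labels ind len_) := by unfold Pre_index_to_div_labels; infer_instance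
def pvWitness_index_to_div_labels : Option (List Int) × Int := (some [1, 3], 5)

def Spec_index_to_div_labels (ind : Option (List Int)) (len_ : Int) (out : String) : Prop := out = index_to_div_labels_alt ind len_
instance (ind : Option (List Int)) (len_ : Int) (out : String) : Decidable (Spec_index_to_div_labels ind len_ out) := by unfold Spec_index_to_div_labels; infer_instance

-- ===== CLAIM (what is proved, stated in full; the proofs are below) =====
def Claim_equal_index_to_div_labels : Prop := ∀ (ind : Option (List Int)) (len_ : Int), Dom_index_to_div_labels ind len_ → Pre_index_to_div_labels ind len_ → Spec_index_to_div_labels ind len_ (index_to_div_labels ind len_)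

-- ===== LEMMAS AND PROOFS =====

-- the appended flags of A's loop are its condition mapped over the range
lemma labels_fold_eq_map (i0 i1 b : Int) :
    (PySem.List.pyRange 0 b 1).foldl
      (fun acc i => if i0 ≤ i ∧ i < i1 then acc ++ ["1"] else acc ++ ["0"]) []
    = (PySem.List.pyRange 0 b 1).map (fun i => if i0 ≤ i ∧ i < i1 then "1" else "0") := by
  have h : (fun (acc : List String) (i : Int) =>
      if i0 ≤ i ∧ i < i1 then acc ++ ["1"] else acc ++ ["0"])
      = fun acc i => acc ++ [if i0 ≤ i ∧ i < i1 then "1" else "0"] := by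
    funext acc i; split <;> rfl
  rw [h, PySem.List.foldl_append_singleton_eq_map, List.nil_append]

-- the 0/1 flags over range n are exactly three replicated runs
lemma map_range_eq_runs (n : ℕ) (i0 i1 : ℤ) :
    (List.range n).map (fun k : ℕ => if i0 ≤ (k : ℤ) ∧ (k : ℤ) < i1 then "1" else "0")
    = List.replicate (max 0 (min i0 (n : ℤ))).toNat "0"
      ++ List.replicate (max 0 (min i1 (n : ℤ) - max 0 (min i0 (n : ℤ)))).toNat "1"
      ++ List.replicate (n - (max 0 (min i0 (n : ℤ))).toNat
            - (max 0 (min i1 (n : ℤ) - max 0 (min i0 (n : ℤ)))).toNat) "0" := by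
  set s := (max 0 (min i0 (n : ℤ))).toNat with hs
  set o := (max 0 (min i1 (n : ℤ) - max 0 (min i0 (n : ℤ)))).toNat with ho
  have hn : n = s + (o + (n - s - o)) := by omega
  have hsplit : List.range n
      = List.range s ++ ((List.range o).map (fun x => s + x)
          ++ (List.range (n - s - o)).map (fun x => s + (o + x))) := by
    conv_lhs => rw [hn]
    rw [List.range_add, List.range_add, List.map_append, List.map_map]
    rfl
  rw [hsplit, List.map_append, List.map_append, List.map_map, List.map_map,
    List.append_assoc]
  congr 1
  · rw [List.eq_replicate_iff]
    refine ⟨by simp, ?_⟩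
    intro x hx
    simp only [List.mem_map, List.mem_range] at hx
    obtain ⟨k, hk, rfl⟩ := hx
    rw [if_neg]
    omega
  congr 1
  · rw [List.eq_replicate_iff]
    refine ⟨by simp, ?_⟩
    intro x hx
    simp only [List.mem_map, List.mem_range, Function.comp] at hx
    obtain ⟨k, hk, rfl⟩ := hx
    rw [if_pos]
    push_cast
    omega
  · rw [List.eq_replicate_iff]
    refine ⟨by simp, ?_⟩
    intro x hx
    simp only [List.mem_map, List.mem_range, Function.comp] at hx
    obtain ⟨k, hk, rfl⟩ := hx
    rw [if_neg]
    push_cast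
    omega

-- joining nonempty char-token lists with ' ' = flatten the space-terminated blocks, drop the last char
lemma join_chars_eq_dropLast (ts : List (List Char)) (h : ts ≠ []) :
    PySem.Chars.join [' '] ts = (ts.map (· ++ [' '])).flatten.dropLast := by
  induction ts with
  | nil => exact absurd rfl h
  | cons x tl ih =>
    cases tl with
    | nil => simp [PySem.Chars.join_singleton]
    | cons y tl' =>
      rw [PySem.Chars.join_cons_cons, ih (by simp)]
      have hne : ((y :: tl').map (· ++ [' '])).flatten ≠ [] := by simp
      rw [show ((x :: y :: tl').map (· ++ [' '])).flatten
            = (x ++ [' ']) ++ ((y :: tl').map (· ++ [' '])).flatten from by simp,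
        List.dropLast_append_of_ne_nil hne, List.append_assoc]

-- the bridge from A's joined run tokens to B's flattened char blocks
lemma join_runs (s o z : ℕ) (h : 0 < s + o + z) :
    PySem.Str.join " " (List.replicate s "0" ++ List.replicate o "1" ++ List.replicate z "0")
    = String.ofList ((List.replicate s ['0', ' '] ++ List.replicate o ['1', ' ']
        ++ List.replicate z ['0', ' ']).flatten.dropLast) := by
  apply String.toList_inj.mp
  rw [PySem.Str.toList_join, String.toList_ofList]
  have hts : (List.replicate s "0" ++ List.replicate o "1" ++ List.replicate z "0") ≠ [] := by
    intro hc
    have := congrArg List.length hc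
    simp at this
    omega
  rw [join_chars_eq_dropLast _ (by
    intro hc
    have := congrArg List.length hc
    simp at this
    omega)]
  simp [List.map_replicate]

-- empty join is the empty string
lemma join_nil_str : PySem.Str.join " " ([] : List String) = "" := by
  apply String.toList_inj.mp
  rw [PySem.Str.toList_join]
  simp [PySem.Chars.join_nil]

-- ===== VERDICT (by name: the statement is the Claim_ definition above) =====
theorem index_to_div_labels_spec : Claim_equal_index_to_div_labels := by
  intro ind len_ _ _
  unfold Spec_index_to_div_labels index_to_div_labels index_to_div_labels_alt
  by_cases hlen : len_ ≤ 0
  · -- empty output on both sides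
    have hrep : ∀ c : List Char, PySem.List.pyRepeat c len_ = [] := by
      intro c
      simp [PySem.List.pyRepeat, Int.toNat_of_nonpos hlen]
    have hrep0 : PySem.List.pyRepeat ["0"] len_ = [] := by
      simp [PySem.List.pyRepeat, Int.toNat_of_nonpos hlen]
    match ind with
    | none => simp [hlen, hrep0, join_nil_str]
    | some l =>
      by_cases hl : l = []
      · simp [hl, hlen, hrep0, join_nil_str]
      · simp only [if_neg hl, if_pos hlen]
        rw [PySem.List.pyRange_one_eq_nil hlen]
        simp [join_nil_str]
  · -- len_ > 0
    have hlen' : 0 < len_ := by omega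
    have hn : ((len_.toNat : ℤ)) = len_ := Int.toNat_of_nonneg (by omega)
    match ind with
    | none =>
      simp only [if_neg (by omega : ¬ len_ ≤ 0)]
      rw [PySem.List.pyRepeat_singleton]
      have := join_runs 0 0 len_.toNat (by omega)
      simp only [List.replicate_zero, List.nil_append] at this
      rw [this]
      simp [PySem.List.pyRepeat, PySem.List.slice_to_neg_one]
    | some l =>
      by_cases hl : l = []
      · simp only [hl, if_neg (by omega : ¬ len_ ≤ 0)]
        rw [PySem.List.pyRepeat_singleton]
        have := join_runs 0 0 len_.toNat (by omega)
        simp only [List.replicate_zero, List.nil_append] at this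
        rw [this]
        simp [PySem.List.pyRepeat, PySem.List.slice_to_neg_one]
      · simp only [if_neg hl, if_neg (by omega : ¬ len_ ≤ 0)]
        set i0 := PySem.List.pyGetD l 0 0 with hi0
        set i1 := PySem.List.pyGetD l 1 0 with hi1
        rw [labels_fold_eq_map, PySem.List.pyRange_one, List.map_map]
        have hbody : ((fun i => if i0 ≤ i ∧ i < i1 then "1" else "0") ∘ fun k : ℕ => 0 + (k : ℤ))
            = fun k : ℕ => if i0 ≤ (k : ℤ) ∧ (k : ℤ) < i1 then "1" else "0" := by
          funext k; simp
        rw [show (len_ - 0).toNat = len_.toNat by omega, hbody,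
          map_range_eq_runs len_.toNat i0 i1, hn]
        set st := max 0 (min i0 len_) with hst
        set on := max 0 (min i1 len_ - st) with hon
        have hst0 : 0 ≤ st := le_max_left _ _
        have hon0 : 0 ≤ on := le_max_left _ _
        have hstle : st ≤ len_ := by omega
        have honle : st + on ≤ len_ := by omega
        rw [show len_.toNat - st.toNat - on.toNat = (len_ - st - on).toNat by omega,
          join_runs st.toNat on.toNat (len_ - st - on).toNat (by omega)]
        simp [PySem.List.pyRepeat, PySem.List.slice_to_neg_one, List.flatten_append]
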